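-- pv_equiv track=rewrite | github.com/Mcszorongat/AdventOfCode2023 | day14.py | search_sequence
-- ===== SOURCE A (Python) =====
-- def search_sequence(tuples: list[tuple[int]]):
--     data_length = len(tuples)
--     if (data_length < 2):
--         return 0, 0
--
--     for offset in range(data_length % 2, len(tuples) - 1, 2):
--         length = int((data_length - offset) / 2)
--         if (compare_tuple_lists(tuples[offset:offset + length],
--                                 tuples[offset + length::])):
--             return offset, length
--
--     return 0, 0
--
-- def compare_tuple_lists(list1: list[tuple], list2: list[tuple]):
--     for element1, element2 in zip(list1, list2):
--         if (element1 != element2):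
--             return False
--     return True
-- ===== SOURCE B (Python) =====
-- def search_sequence(tuples: list[tuple[int]]):
--     n = len(tuples)
--     if n < 2:
--         return 0, 0
--     rev = tuples[::-1]
--     z = _z_array(rev)
--     # candidate half-length L corresponds to A's offset n - 2*L, scanned descending
--     for L in range(n // 2, 0, -1):
--         if z[L] >= L:
--             return n - 2 * L, L
--     return 0, 0
--
--
-- def _z_array(s):
--     """Z-algorithm: z[i] = length of longest common prefix of s and s[i:]."""
--     n = len(s)
--     z = [0] * n
--     z[0] = n
--     l = r = 0
--     for i in range(1, n):
--         if i < r: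
--             z[i] = min(r - i, z[i - l])
--         while i + z[i] < n and s[z[i]] == s[i + z[i]]:
--             z[i] += 1
--         if i + z[i] > r:
--             l, r = i, i + z[i]
--     return z
-- ===== Notes on version B (the rewrite author's own statement) =====
-- stated objective: alternative
-- what changed: Replaces A's ascending offset scan that slices and compares the two suffix halves at every candidate by a single Z-array pass over the reversed sequence, after which each candidate half-length is a single table check.
import Mathlib
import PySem

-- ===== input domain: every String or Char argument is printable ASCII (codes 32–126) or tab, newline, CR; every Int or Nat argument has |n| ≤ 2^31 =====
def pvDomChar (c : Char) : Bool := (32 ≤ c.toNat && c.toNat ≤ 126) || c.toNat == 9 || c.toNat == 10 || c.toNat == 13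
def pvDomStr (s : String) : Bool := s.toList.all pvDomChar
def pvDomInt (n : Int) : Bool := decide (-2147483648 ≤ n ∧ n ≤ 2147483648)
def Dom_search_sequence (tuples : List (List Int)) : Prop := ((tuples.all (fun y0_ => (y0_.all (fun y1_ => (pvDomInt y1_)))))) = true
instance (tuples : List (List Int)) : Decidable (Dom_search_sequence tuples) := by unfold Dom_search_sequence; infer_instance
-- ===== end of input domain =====

-- B replaces A's per-offset slice-and-compare scan by a Z-array on the reversed sequence,
-- turning each candidate offset into a single table check; objective: alternative algorithm.

-- ===== PORT A =====
def compare_tuple_lists (list1 list2 : List (List Int)) : Bool :=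
  (list1.zip list2).all (fun e => e.1 == e.2)

-- the 'for offset in range(data_length % 2, data_length - 1, 2)' loop of A, with early return
def pvALoop (tuples : List (List Int)) (n : Int) (offset : Int) : Int × Int :=
  if h : offset < n - 1 then
    let length : Int := (n - offset) / 2
    if compare_tuple_lists (PySem.List.slice tuples (some offset) (some (offset + length)))
        (PySem.List.slice tuples (some (offset + length)) none) then
      (offset, length)
    else
      pvALoop tuples n (offset + 2)
  else (0, 0)
termination_by (n - offset).toNat
decreasing_by omega

def search_sequence (tuples : List (List Int)) : Int × Int :=
  let data_length : Int := (tuples.length : Int)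
  if data_length < 2 then (0, 0)
  else pvALoop tuples data_length (PySem.Int.mod data_length 2)

-- ===== PORT B =====
-- the 'while i + z[i] < n and s[z[i]] == s[i + z[i]]: z[i] += 1' loop of _z_array
def pvExtend (s : List (List Int)) (n : Nat) (i k : Nat) : Nat :=
  if h : i + k < n ∧ s[k]? == s[i + k]? then pvExtend s n i (k + 1) else k
termination_by n - (i + k)
decreasing_by omega

-- 'z[i] = min(r - i, z[i - l]) if i < r else 0' followed by the while-extension: one i-step's z value
def pvZStep (s : List (List Int)) (n i : Nat) (z : Array Nat) (l r : Nat) : Nat :=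
  pvExtend s n i (if i < r then min (r - i) (z.getD (i - l) 0) else 0)

-- the 'for i in range(1, n)' loop of _z_array, state (z, l, r)
def pvZGo (s : List (List Int)) (n : Nat) (i : Nat) (z : Array Nat) (l r : Nat) :
    Array Nat :=
  if h : i < n then
    if r < i + pvZStep s n i z l r then
      pvZGo s n (i + 1) (z.setIfInBounds i (pvZStep s n i z l r)) i (i + pvZStep s n i z l r)
    else pvZGo s n (i + 1) (z.setIfInBounds i (pvZStep s n i z l r)) l r
  else z
termination_by n - i
decreasing_by all_goals omega

def pvZArray (s : List (List Int)) : Array Nat :=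
  let n := s.length
  pvZGo s n 1 ((Array.replicate n 0).setIfInBounds 0 n) 0 0

-- the 'for L in range(n // 2, 0, -1)' loop of B, with early return
def pvBLoop (n : Nat) (z : Array Nat) : Nat → Int × Int
  | 0 => (0, 0)
  | (L + 1) =>
      if L + 1 ≤ z.getD (L + 1) 0 then ((n : Int) - 2 * ((L : Int) + 1), (L : Int) + 1)
      else pvBLoop n z L

def search_sequence_alt (tuples : List (List Int)) : Int × Int :=
  let n := tuples.length
  if n < 2 then (0, 0)
  else pvBLoop n (pvZArray tuples.reverse) (n / 2)

-- ===== PRECONDITION & SPEC =====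
def Spec_search_sequence (tuples : List (List Int)) (out : Int × Int) : Prop := out = search_sequence_alt tuples
instance (tuples : List (List Int)) (out : Int × Int) : Decidable (Spec_search_sequence tuples out) := by unfold Spec_search_sequence; infer_instance

-- ===== CLAIM (what is proved, stated in full; the proofs are below) =====
def Claim_equal_search_sequence : Prop := ∀ (tuples : List (List Int)), Dom_search_sequence tuples → Spec_search_sequence tuples (search_sequence tuples)

-- ===== LEMMAS AND PROOFS =====

-- E s i = naive longest-common-prefix length of s and s.drop i (what _z_array's z[i] must equal)
def pvE (s : List (List Int)) (i : Nat) : Nat := pvExtend s s.length i 0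

theorem pvExtend_ge (s : List (List Int)) (n i k : Nat) : k ≤ pvExtend s n i k := by
  fun_induction pvExtend with
  | case1 k h ih => omega
  | case2 k h => omega

theorem pvExtend_le (s : List (List Int)) (n i k : Nat) (hk : i + k ≤ n) :
    i + pvExtend s n i k ≤ n := by
  fun_induction pvExtend with
  | case1 k h ih => exact ih (by omega)
  | case2 k h => omega

theorem pvExtend_match (s : List (List Int)) (n i k : Nat)
    (hk : ∀ j < k, s[j]? = s[i + j]?) :
    ∀ j < pvExtend s n i k, s[j]? = s[i + j]? := by
  fun_induction pvExtend with
  | case1 k h ih =>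
      refine ih ?_
      intro j hj
      rcases Nat.lt_succ_iff_lt_or_eq.mp hj with hj | rfl
      · exact hk j hj
      · exact beq_iff_eq.mp h.2
  | case2 k h => exact hk

theorem pvExtend_eq_zero_start (s : List (List Int)) (n i k : Nat)
    (hk : ∀ j < k, s[j]? = s[i + j]?) (hn : i + k ≤ n) :
    pvExtend s n i k = pvExtend s n i 0 := by
  induction k with
  | zero => rfl
  | succ k ih =>
      have h1 : pvExtend s n i k = pvExtend s n i (k + 1) := by
        rw [pvExtend]
        have : i + k < n ∧ s[k]? == s[i + k]? :=
          ⟨by omega, beq_iff_eq.mpr (hk k (by omega))⟩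
        simp [this]
      rw [← h1, ih (fun j hj => hk j (by omega)) (by omega)]

theorem pvE_ge_iff (s : List (List Int)) (L : Nat) (hL : L + L ≤ s.length) :
    (L ≤ pvE s L) ↔ (∀ m < L, s[m]? = s[L + m]?) := by
  constructor
  · intro h m hm
    unfold pvE at h
    exact pvExtend_match s s.length L 0 (by omega) m (by omega)
  · intro h
    have := pvExtend_eq_zero_start s s.length L L h (by omega)
    have := pvExtend_ge s s.length L L
    unfold pvE
    omega

-- invariant of the z loop
def pvZInv (s : List (List Int)) (n i : Nat) (z : Array Nat) (l r : Nat) : Prop :=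
  n = s.length ∧ z.size = n ∧ 1 ≤ i ∧ l < i ∧ r ≤ n ∧ (r ≤ i ∨ 1 ≤ l) ∧
  (∀ j < r - l, s[j]? = s[l + j]?) ∧
  (∀ j, 1 ≤ j → j < i → z.getD j 0 = pvE s j)

theorem getD_setIfInBounds (a : Array Nat) (i j v : Nat) (hi : i < a.size) :
    (a.setIfInBounds i v).getD j 0 = if j = i then v else a.getD j 0 := by
  simp [Array.getD, Array.size_setIfInBounds]
  split_ifs <;> simp_all [Array.getElem_setIfInBounds] <;> omega

theorem pvE_match (s : List (List Int)) (i : Nat) :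
    ∀ j < pvE s i, s[j]? = s[i + j]? :=
  pvExtend_match s s.length i 0 (by omega)

theorem pvZGo_go (s : List (List Int)) (n : Nat) :
    ∀ (m i : Nat) (z : Array Nat) (l r : Nat), n - i = m → pvZInv s n i z l r →
    ∀ j, 1 ≤ j → j < n → (pvZGo s n i z l r).getD j 0 = pvE s j := by
  intro m
  induction m with
  | zero =>
      intro i z l r hm hinv j hj1 hj2
      obtain ⟨hns, hzs, hi1, hli, hrn, hrl, hwin, hent⟩ := hinv
      rw [pvZGo, dif_neg (by omega)]
      exact hent j hj1 (by omega)
  | succ m ih =>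
      intro i z l r hm hinv j hj1 hj2
      obtain ⟨hns, hzs, hi1, hli, hrn, hrl, hwin, hent⟩ := hinv
      have hin : i < n := by omega
      rw [pvZGo, dif_pos hin]
      set zi0 : Nat := (if i < r then min (r - i) (z.getD (i - l) 0) else 0) with hzi0def
      -- the starting value zi0 is a valid partial match
      have hkey : ∀ j < zi0, s[j]? = s[i + j]? := by
        intro j hj
        rw [hzi0def] at hj
        by_cases hir : i < r
        · rw [if_pos hir] at hj
          have hl1 : 1 ≤ l := by omega
          have hEil : z.getD (i - l) 0 = pvE s (i - l) :=
            hent (i - l) (by omega) (by omega)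
          have h1 : s[j]? = s[(i - l) + j]? := by
            apply pvE_match s (i - l) j
            omega
          have h2 : s[(i - l) + j]? = s[l + ((i - l) + j)]? :=
            hwin ((i - l) + j) (by omega)
          have e : l + ((i - l) + j) = i + j := by omega
          rw [h1, h2, e]
        · rw [if_neg hir] at hj; omega
      have hle : i + zi0 ≤ n := by
        rw [hzi0def]
        by_cases hir : i < r
        · rw [if_pos hir]; omega
        · rw [if_neg hir]; omega
      have hstep : pvZStep s n i z l r = pvExtend s n i zi0 := by
        rw [pvZStep, hzi0def]
      have hziE : pvExtend s n i zi0 = pvE s i := by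
        rw [pvExtend_eq_zero_start s n i zi0 hkey hle, pvE, hns]
      have hziN : i + pvExtend s n i zi0 ≤ n := pvExtend_le s n i zi0 hle
      rw [hstep]
      set zi : Nat := pvExtend s n i zi0 with hzidef
      have hsz' : (z.setIfInBounds i zi).size = n := by
        rw [Array.size_setIfInBounds, hzs]
      have hent' : ∀ j', 1 ≤ j' → j' < i + 1 → (z.setIfInBounds i zi).getD j' 0 = pvE s j' := by
        intro j' h1 h2
        rw [getD_setIfInBounds z i j' zi (by omega)]
        by_cases hji : j' = i
        · rw [if_pos hji, hji, ← hziE]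
        · rw [if_neg hji]; exact hent j' h1 (by omega)
      by_cases hbr : r < i + zi
      · rw [if_pos hbr]
        refine ih (i + 1) (z.setIfInBounds i zi) i (i + zi) (by omega)
          ⟨hns, hsz', by omega, by omega, by omega, by omega, ?_, hent'⟩ j hj1 hj2
        intro j' hj'
        have : j' < zi := by omega
        have := pvExtend_match s n i zi0 hkey j' (by omega)
        exact this
      · rw [if_neg hbr]
        exact ih (i + 1) (z.setIfInBounds i zi) l r (by omega)
          ⟨hns, hsz', by omega, by omega, hrn, by omega, hwin, hent'⟩ j hj1 hj2

theorem pvZArray_spec (s : List (List Int)) :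
    ∀ j, 1 ≤ j → j < s.length → (pvZArray s).getD j 0 = pvE s j := by
  apply pvZGo_go s s.length (s.length - 1) 1 _ 0 0 rfl
  refine ⟨rfl, by simp, le_refl 1, by omega, by omega, by omega, ?_, ?_⟩
  · intro j hj; omega
  · intro j hj1 hj2; omega

-- compare_tuple_lists checks elementwise equality up to the shorter length
theorem cmp_iff (l1 l2 : List (List Int)) :
    compare_tuple_lists l1 l2 = true ↔ ∀ j < min l1.length l2.length, l1[j]? = l2[j]? := by
  induction l1 generalizing l2 with
  | nil => simp [compare_tuple_lists]
  | cons x xs ih =>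
      cases l2 with
      | nil => simp [compare_tuple_lists]
      | cons y ys =>
          have hstep : compare_tuple_lists (x :: xs) (y :: ys) =
              ((x == y) && compare_tuple_lists xs ys) := by
            simp [compare_tuple_lists]
          rw [hstep, Bool.and_eq_true, ih ys]
          constructor
          · rintro ⟨h1, h2⟩ j hj
            cases j with
            | zero => simpa using beq_iff_eq.mp h1
            | succ j =>
                simp only [List.getElem?_cons_succ]
                exact h2 j (by simp only [List.length_cons] at hj ⊢; omega)
          · intro h
            constructor
            · have := h 0 (by simp only [List.length_cons]; omega)
              simpa [beq_iff_eq] using this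
            · intro j hj
              have := h (j + 1) (by simp only [List.length_cons] at hj ⊢; omega)
              simpa using this

theorem cond_iff_u (u : List (List Int)) (L : Nat) (hu : u.length = 2 * L) :
    (compare_tuple_lists (u.take L) (u.drop L) = true) ↔ ∀ j < L, u[j]? = u[L + j]? := by
  rw [cmp_iff]
  have h1 : (u.take L).length = L := by simp [hu]; omega
  have h2 : (u.drop L).length = L := by simp [hu]; omega
  rw [h1, h2, Nat.min_self]
  constructor
  · intro h j hj
    have := h j hj
    rwa [List.getElem?_take_of_lt hj, List.getElem?_drop] at this
  · intro h j hj
    rw [List.getElem?_take_of_lt hj, List.getElem?_drop]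
    exact h j hj

theorem rev_cond (u : List (List Int)) (L : Nat) (hu : u.length = 2 * L) :
    (∀ j < L, u[j]? = u[L + j]?) ↔ (∀ m < L, u.reverse[m]? = u.reverse[L + m]?) := by
  have hr : ∀ m, m < 2 * L → u.reverse[m]? = u[2 * L - 1 - m]? := by
    intro m hm
    rw [List.getElem?_reverse (by omega)]
    congr 1
    omega
  constructor
  · intro h m hm
    rw [hr m (by omega), hr (L + m) (by omega)]
    have hx := h (L - 1 - m) (by omega)
    have e1 : L + (L - 1 - m) = 2 * L - 1 - m := by omega
    have e2 : 2 * L - 1 - (L + m) = L - 1 - m := by omega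
    rw [e1] at hx
    rw [e2]
    exact hx.symm
  · intro h j hj
    have hx := h (L - 1 - j) (by omega)
    rw [hr (L - 1 - j) (by omega), hr (L + (L - 1 - j)) (by omega)] at hx
    have e1 : 2 * L - 1 - (L - 1 - j) = L + j := by omega
    have e2 : 2 * L - 1 - (L + (L - 1 - j)) = j := by omega
    rw [e1, e2] at hx
    exact hx.symm

-- the per-candidate condition: A's slice comparison at offset n-2L equals B's z-check at L
theorem cond_equiv (t : List (List Int)) (L : Nat) (hL1 : 1 ≤ L)
    (hL2 : L + L ≤ t.length) :
    (compare_tuple_lists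
        (PySem.List.slice t (some ((t.length : Int) - 2 * L)) (some ((t.length : Int) - L)))
        (PySem.List.slice t (some ((t.length : Int) - L)) none) = true)
      ↔ L ≤ pvE t.reverse L := by
  have e1 : (t.length : Int) - 2 * L = ((t.length - 2 * L : Nat) : Int) := by omega
  have e2 : (t.length : Int) - L = ((t.length - L : Nat) : Int) := by omega
  rw [e1, e2, PySem.List.slice_natCast, PySem.List.slice_from_natCast]
  set u := t.drop (t.length - 2 * L) with hudef
  have hu : u.length = 2 * L := by
    rw [hudef, List.length_drop]; omega
  have etake : t.length - L - (t.length - 2 * L) = L := by omega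
  have edrop : t.drop (t.length - L) = u.drop L := by
    rw [hudef, List.drop_drop]
    congr 1
    omega
  rw [etake, edrop, cond_iff_u u L hu, rev_cond u L hu]
  have hurev : u.reverse = t.reverse.take (2 * L) := by
    rw [hudef, List.reverse_drop]
    congr 1
    omega
  have hrt : ∀ m, m < 2 * L → u.reverse[m]? = t.reverse[m]? := by
    intro m hm
    rw [hurev, List.getElem?_take_of_lt hm]
  have hlen : L + L ≤ (t.reverse).length := by simp; omega
  rw [pvE_ge_iff t.reverse L hlen]
  constructor
  · intro h m hm
    have := h m hm
    rwa [hrt m (by omega), hrt (L + m) (by omega)] at this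
  · intro h m hm
    rw [hrt m (by omega), hrt (L + m) (by omega)]
    exact h m hm

theorem loop_equiv (t : List (List Int)) (L : Nat) (hL : L ≤ t.length / 2)
    (_hn : 2 ≤ t.length) :
    pvALoop t (t.length : Int) ((t.length : Int) - 2 * L) =
      pvBLoop t.length (pvZArray t.reverse) L := by
  induction L with
  | zero =>
      rw [pvALoop, dif_neg (by push_cast; omega)]
      rfl
  | succ L ih =>
      have hnL : L + 1 < t.length := by omega
      rw [pvALoop, dif_pos (by push_cast; omega)]
      simp only []
      have elen : ((t.length : Int) - ((t.length : Int) - 2 * (L + 1 : Nat))) / 2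
          = ((L + 1 : Nat) : Int) := by omega
      have eoff : (t.length : Int) - 2 * ((L + 1 : Nat) : Int) + ((L + 1 : Nat) : Int)
          = (t.length : Int) - ((L + 1 : Nat) : Int) := by omega
      have hz : (pvZArray t.reverse).getD (L + 1) 0 = pvE t.reverse (L + 1) := by
        apply pvZArray_spec t.reverse (L + 1) (by omega)
        simp
        omega
      have hcond := cond_equiv t (L + 1) (by omega) (by omega)
      rw [pvBLoop]
      by_cases hc : L + 1 ≤ pvE t.reverse (L + 1)
      · have hA : compare_tuple_lists
            (PySem.List.slice t (some ((t.length : Int) - 2 * (L + 1 : Nat)))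
              (some ((t.length : Int) - 2 * (L + 1 : Nat) +
                ((t.length : Int) - ((t.length : Int) - 2 * (L + 1 : Nat))) / 2)))
            (PySem.List.slice t (some ((t.length : Int) - 2 * (L + 1 : Nat) +
                ((t.length : Int) - ((t.length : Int) - 2 * (L + 1 : Nat))) / 2)) none) = true := by
          rw [elen, eoff]
          exact hcond.mpr hc
        rw [if_pos hA, if_pos (by rw [hz]; omega)]
        rw [elen]
        push_cast
        ring_nf
      · have hA : ¬ (compare_tuple_lists
            (PySem.List.slice t (some ((t.length : Int) - 2 * (L + 1 : Nat)))
              (some ((t.length : Int) - 2 * (L + 1 : Nat) +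
                ((t.length : Int) - ((t.length : Int) - 2 * (L + 1 : Nat))) / 2)))
            (PySem.List.slice t (some ((t.length : Int) - 2 * (L + 1 : Nat) +
                ((t.length : Int) - ((t.length : Int) - 2 * (L + 1 : Nat))) / 2)) none) = true) := by
          rw [elen, eoff]
          intro hcc
          exact hc (hcond.mp hcc)
        rw [if_neg hA, if_neg (by rw [hz]; omega)]
        have estep : (t.length : Int) - 2 * ((L + 1 : Nat) : Int) + 2
            = (t.length : Int) - 2 * (L : Nat) := by omega
        rw [estep]
        exact ih (by omega)

theorem main_eq (t : List (List Int)) : search_sequence t = search_sequence_alt t := by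
  unfold search_sequence search_sequence_alt
  by_cases h : (t.length : Int) < 2
  · have h2 : t.length < 2 := by omega
    simp [h, h2]
  · have hn : 2 ≤ t.length := by omega
    have h2 : ¬ (t.length < 2) := by omega
    simp only [h, h2, if_false]
    have hmod : PySem.Int.mod (t.length : Int) 2
        = (t.length : Int) - 2 * ((t.length / 2 : Nat) : Int) := by
      simp [PySem.Int.mod, Int.fmod_eq_emod]
      omega
    rw [hmod]
    exact loop_equiv t (t.length / 2) (le_refl _) hn

-- ===== VERDICT (by name: the statement is the Claim_ definition above) =====
theorem search_sequence_spec : Claim_equal_search_sequence := by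
  intro t _
  unfold Spec_search_sequence
  exact main_eq t
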